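-- pv_equiv track=rewrite | github.com/Geniusin/algorithm_study | 단계별로 풀어보기/동적계획법/9461_파도반 수열.py | tri
-- ===== SOURCE A (Python) =====
-- def tri(n):
--
--     if n == 1: return 1
--     if n == 2: return 1
--     if n == 3: return 1
--     if n == 4: return 2
--     if n == 5: return 2
--     else:
--         return tri(n-1) + tri(n-5)
--
-- n = 12
-- ===== SOURCE B (Python) =====
-- def tri(n):
--     if n <= 5:
--         return (1, 1, 1, 2, 2)[n - 1]
--     a, b, c, d, e = 1, 1, 1, 2, 2
--     for _ in range(6, n + 1):
--         a, b, c, d, e = b, c, d, e, e + a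
--     return e
-- ===== Notes on version B (the rewrite author's own statement) =====
-- stated objective: faster
-- what changed: Replaced the exponential double recursion tri(n-1)+tri(n-5) by a bottom-up loop keeping only the last five values in a rolling 5-tuple.
import Mathlib
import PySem

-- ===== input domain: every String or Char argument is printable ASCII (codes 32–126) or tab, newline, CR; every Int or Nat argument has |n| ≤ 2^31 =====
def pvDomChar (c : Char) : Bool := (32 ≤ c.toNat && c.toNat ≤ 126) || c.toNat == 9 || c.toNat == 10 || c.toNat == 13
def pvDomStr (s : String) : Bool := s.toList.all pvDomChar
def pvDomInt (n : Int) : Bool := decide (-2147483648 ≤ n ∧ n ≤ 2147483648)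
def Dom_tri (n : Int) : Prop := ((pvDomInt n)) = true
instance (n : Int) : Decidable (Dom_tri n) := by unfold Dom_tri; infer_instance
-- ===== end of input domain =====

-- B replaces A's exponential double recursion by a bottom-up O(n) loop over a rolling 5-tuple (objective: faster).

-- ===== PORT A =====
-- A's recursion, on the Nat distance from 0 (A only terminates for n ≥ 1, see Pre_tri)
def triRec : Nat → Int
  | 1 => 1
  | 2 => 1
  | 3 => 1
  | 4 => 2
  | 5 => 2
  | k + 6 => triRec (k + 5) + triRec (k + 1)   -- tri(n-1) + tri(n-5)
  | 0 => 0    -- unreachable under Pre_tri (Python A never returns for n ≤ 0)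

def tri (n : Int) : Int := triRec n.toNat

-- ===== PORT B =====
-- one loop body step: (a,b,c,d,e) := (b,c,d,e,e+a)
def triStep (s : Int × Int × Int × Int × Int) : Int × Int × Int × Int × Int :=
  (s.2.1, s.2.2.1, s.2.2.2.1, s.2.2.2.2, s.2.2.2.2 + s.1)

-- the for-loop: k remaining iterations over state s (tail-recursive, like the Python loop)
def triLoopGo : Nat → Int × Int × Int × Int × Int → Int × Int × Int × Int × Int
  | 0, s => s
  | k + 1, s => triLoopGo k (triStep s)

def triLoop (k : Nat) : Int × Int × Int × Int × Int := triLoopGo k (1, 1, 1, 2, 2)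

def tri_alt (n : Int) : Int :=
  if n ≤ 5 then
    (PySem.List.pyGet? ([1, 1, 1, 2, 2] : List Int) (n - 1)).getD 0   -- (1,1,1,2,2)[n-1]
  else
    (triLoop (n - 5).toNat).2.2.2.2   -- e after range(6, n+1) iterations

-- ===== PRECONDITION & SPEC =====
-- Pre_tri excludes n ≤ 0, where Python A recurses forever (RecursionError), returning nothing.
def Pre_tri (n : Int) : Prop := 1 ≤ n
instance (n : Int) : Decidable (Pre_tri n) := by unfold Pre_tri; infer_instance
def pvWitness_tri : Int := 7

def Spec_tri (n : Int) (out : Int) : Prop := out = tri_alt n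
instance (n : Int) (out : Int) : Decidable (Spec_tri n out) := by unfold Spec_tri; infer_instance

-- ===== CLAIM (what is proved, stated in full; the proofs are below) =====
def Claim_equal_tri : Prop := ∀ (n : Int), Dom_tri n → Pre_tri n → Spec_tri n (tri n)

-- ===== LEMMAS AND PROOFS =====

-- pushing one step through the tail-recursive loop
theorem triLoopGo_step (k : Nat) (s : Int × Int × Int × Int × Int) :
    triLoopGo (k + 1) s = triStep (triLoopGo k s) := by
  induction k generalizing s with
  | zero => rfl
  | succ k ih => exact ih (triStep s)

-- the rolling tuple after k steps holds triRec (k+1) … triRec (k+5)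
theorem triLoop_eq (k : Nat) :
    triLoop k = (triRec (k + 1), triRec (k + 2), triRec (k + 3), triRec (k + 4), triRec (k + 5)) := by
  induction k with
  | zero => decide
  | succ k ih =>
    have h : triLoop (k + 1) = triStep (triLoop k) := triLoopGo_step k _
    rw [h, ih]
    show _ = (triRec (k + 2), triRec (k + 3), triRec (k + 4), triRec (k + 5), triRec (k + 1 + 5))
    have : triRec (k + 1 + 5) = triRec (k + 5) + triRec (k + 1) := rfl
    simp [triStep, this]

-- ===== VERDICT (by name: the statement is the Claim_ definition above) =====
theorem tri_spec : Claim_equal_tri := by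
  intro n _ hpre
  unfold Spec_tri tri tri_alt
  have hn : (1 : Int) ≤ n := hpre
  by_cases h5 : n ≤ 5
  · -- n ∈ {1,2,3,4,5}
    interval_cases n <;> decide
  · simp only [if_neg h5]
    push Not at h5
    have h6 : (6 : Int) ≤ n := h5
    have hm : ∃ m : Nat, n = (m : Int) + 6 := by
      refine ⟨(n - 6).toNat, ?_⟩
      omega
    obtain ⟨m, rfl⟩ := hm
    have h1 : ((m : Int) + 6).toNat = m + 6 := by omega
    have h2 : ((m : Int) + 6 - 5).toNat = m + 1 := by omega
    rw [h1, h2, triLoop_eq]
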